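-- pv_equiv track=rewrite | github.com/akarsh1995/entity_visualizer | src/nlp_process.py | stan_sub_list
-- ===== SOURCE A (Python) =====
-- def stan_sub_list(nlist):
--     allpers = []
--     for k in range(0, len(nlist)):
--         testlist = nlist[k]
--         personlist = []
--         tempp = ""
--         for i in range(0, len(testlist)):
--             if testlist[i][1] == "PERSON":
--                 tempp = tempp + " " + testlist[i][0]
--             else:
--                 if (i >= 1 and testlist[i - 1][1] == "PERSON"):
--                     personlist.append(tempp)
--                     tempp = ""
--         allpers.append(personlist)
--     allloc = []
--     for k in range(0, len(nlist)):
--         testlist = nlist[k]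
--         loclist = []
--         tempp = ""
--         for i in range(0, len(testlist)):
--             if testlist[i][1] == "LOCATION":
--                 tempp = tempp + " " + testlist[i][0]
--             else:
--                 if (i >= 1 and testlist[i - 1][1] == "LOCATION"):
--                     loclist.append(tempp)
--                     tempp = ""
--         allloc.append(loclist)
--     allorg = []
--     for k in range(0, len(nlist)):
--         testlist = nlist[k]
--         orglist = []
--         tempp = ""
--         for i in range(0, len(testlist)):
--             if testlist[i][1] == "ORGANIZATION":
--                 tempp = tempp + " " + testlist[i][0]
--             else:
--                 if (i >= 1 and testlist[i - 1][1] == "ORGANIZATION"):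
--                     orglist.append(tempp)
--                     tempp = ""
--         allorg.append(orglist)
--     return allpers, allloc, allorg
-- ===== SOURCE B (Python) =====
-- def _runs(tokens):
--     # split into maximal runs of equal tag: (tag, words, is_trailing_run)
--     if not tokens:
--         return []
--     t = tokens[0][1]
--     i = 1
--     while i < len(tokens) and tokens[i][1] == t:
--         i += 1
--     return [(t, [p[0] for p in tokens[:i]], i == len(tokens))] + _runs(tokens[i:])
--
--
-- def _phrases(tag, tokens):
--     # a trailing run is never emitted (A never flushes it); phrases keep the leading space
--     return ["".join(" " + w for w in ws)
--             for t, ws, last in _runs(tokens) if t == tag and not last]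
--
--
-- def stan_sub_list(nlist):
--     return ([_phrases("PERSON", s) for s in nlist],
--             [_phrases("LOCATION", s) for s in nlist],
--             [_phrases("ORGANIZATION", s) for s in nlist])
-- ===== Notes on version B (the rewrite author's own statement) =====
-- stated objective: alternative
-- what changed: Replaces three independent stateful index loops with per-token lookback (testlist[i-1]) by a run-length decomposition: each sublist is split once into maximal runs of equal tag, and each entity list is a comprehension over those runs keeping non-trailing runs of the wanted tag and joining their words.
import Mathlib
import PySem

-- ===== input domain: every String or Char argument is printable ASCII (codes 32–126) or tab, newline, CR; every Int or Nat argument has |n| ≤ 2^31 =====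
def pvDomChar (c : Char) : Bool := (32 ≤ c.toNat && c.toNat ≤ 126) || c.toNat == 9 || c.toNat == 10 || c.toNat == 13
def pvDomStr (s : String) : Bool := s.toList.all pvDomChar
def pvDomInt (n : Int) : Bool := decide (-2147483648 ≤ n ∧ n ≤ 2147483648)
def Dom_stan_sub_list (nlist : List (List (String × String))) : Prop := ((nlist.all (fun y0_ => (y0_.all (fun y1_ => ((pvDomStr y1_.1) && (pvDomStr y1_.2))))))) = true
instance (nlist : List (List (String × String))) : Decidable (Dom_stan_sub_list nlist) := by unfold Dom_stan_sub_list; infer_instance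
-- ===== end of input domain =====

-- B replaces A's three lookback index loops by a run-length decomposition of each sublist
-- (maximal runs of equal tag, then filter/join); an alternative decomposition, same cost.


-- ===== PORT A =====
-- A's three loops are textually identical up to the tag literal; the shared body is this
-- helper applied to "PERSON"/"LOCATION"/"ORGANIZATION".  Indices from range(0, len) are
-- always in bounds, so Python's testlist[i] / testlist[i-1] (guarded by i >= 1, so the
-- subtraction stays in range) is exactly List.getD here.
def stanPass (tag : String) (ts : List (String × String)) : List String :=
  ((List.range ts.length).foldl
    (fun (st : List String × String) i =>
      if (ts.getD i ("", "")).2 == tag then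
        (st.1, st.2 ++ " " ++ (ts.getD i ("", "")).1)
      else
        if 1 ≤ i && ((ts.getD (i - 1) ("", "")).2 == tag) then
          (st.1 ++ [st.2], "")
        else st)
    ([], "")).1

def stan_sub_list (nlist : List (List (String × String))) : List (List String) × List (List String) × List (List String) :=
  let allpers := nlist.foldl (fun acc testlist => acc ++ [stanPass "PERSON" testlist]) []
  let allloc := nlist.foldl (fun acc testlist => acc ++ [stanPass "LOCATION" testlist]) []
  let allorg := nlist.foldl (fun acc testlist => acc ++ [stanPass "ORGANIZATION" testlist]) []
  (allpers, allloc, allorg)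

-- ===== PORT B =====
-- _runs: split into maximal runs of equal tag (tag, words, is_trailing_run); the index
-- scan 'while i < len and tokens[i][1] == t' is takeWhile/dropWhile on the tail.
def runsB : List (String × String) → List (String × List String × Bool)
  | [] => []
  | (w, t) :: rest =>
    let same := rest.takeWhile (fun p => p.2 == t)
    let rem := rest.dropWhile (fun p => p.2 == t)
    (t, w :: same.map (·.1), rem.isEmpty) :: runsB rem
termination_by ts => ts.length
decreasing_by
  simp only [List.length_cons]
  exact Nat.lt_succ_of_le (List.length_dropWhile_le _ _)

-- "".join(" " + w for w in ws)
def joinPhrase (ws : List String) : String := String.join (ws.map (fun w => " " ++ w))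

def phrasesB (tag : String) (ts : List (String × String)) : List String :=
  (runsB ts).filterMap (fun r => if r.1 == tag && !r.2.2 then some (joinPhrase r.2.1) else none)

def stan_sub_list_alt (nlist : List (List (String × String))) : List (List String) × List (List String) × List (List String) :=
  (nlist.map (fun s => phrasesB "PERSON" s),
   nlist.map (fun s => phrasesB "LOCATION" s),
   nlist.map (fun s => phrasesB "ORGANIZATION" s))

-- ===== PRECONDITION & SPEC =====
def Spec_stan_sub_list (nlist : List (List (String × String))) (out : List (List String) × List (List String) × List (List String)) : Prop := out = stan_sub_list_alt nlist
instance (nlist : List (List (String × String))) (out : List (List String) × List (List String) × List (List String)) : Decidable (Spec_stan_sub_list nlist out) := by unfold Spec_stan_sub_list; infer_instance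

-- ===== CLAIM (what is proved, stated in full; the proofs are below) =====
def Claim_equal_stan_sub_list : Prop := ∀ (nlist : List (List (String × String))), Dom_stan_sub_list nlist → Spec_stan_sub_list nlist (stan_sub_list nlist)

-- ===== LEMMAS AND PROOFS =====

-- mid-level recursion: A's loop read forwards, carrying "previous token had the tag" and
-- the pending accumulator; both ports are proved equal to it.
def mid (tag : String) (prev : Bool) (acc : String) : List (String × String) → List String
  | [] => []
  | (w, t) :: rest =>
    if t == tag then mid tag true (acc ++ " " ++ w) rest
    else if prev then acc :: mid tag false "" rest
    else mid tag false acc rest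

lemma joinPhrase_cons (w : String) (ws : List String) :
    joinPhrase (w :: ws) = (" " ++ w) ++ joinPhrase ws := by
  have shift : ∀ (l : List String) (a : String), l.foldl (· ++ ·) a = a ++ l.foldl (· ++ ·) "" := by
    intro l
    induction l with
    | nil => intro a; simp [List.foldl]
    | cons x xs ih =>
      intro a
      simp only [List.foldl]
      rw [ih ("" ++ x), ih (a ++ x), String.empty_append, String.append_assoc]
  simp only [joinPhrase, List.map_cons, String.join, List.foldl]
  rw [shift, String.empty_append]

-- A's fold over the index range equals mid (suffix induction over range').
lemma stanPass_range' (tag : String) (ts : List (String × String)) :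
    ∀ (m k : Nat) (out : List String) (acc : String), k + m = ts.length →
      ((List.range' k m).foldl
        (fun (st : List String × String) i =>
          if (ts.getD i ("", "")).2 == tag then
            (st.1, st.2 ++ " " ++ (ts.getD i ("", "")).1)
          else
            if 1 ≤ i && ((ts.getD (i - 1) ("", "")).2 == tag) then
              (st.1 ++ [st.2], "")
            else st)
        (out, acc)).1
      = out ++ mid tag (decide (1 ≤ k) && ((ts.getD (k - 1) ("", "")).2 == tag)) acc (ts.drop k) := by
  intro m
  induction m with
  | zero =>
    intro k out acc hk
    have : ts.drop k = [] := List.drop_eq_nil_of_le (by omega)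
    simp [this, mid]
  | succ m ih =>
    intro k out acc hk
    have hklt : k < ts.length := by omega
    rcases hx : ts[k] with ⟨w0, t0⟩
    have hget2 : ts[k]? = some (w0, t0) := by
      rw [List.getElem?_eq_getElem hklt, hx]
    have hdrop : ts.drop k = (w0, t0) :: ts.drop (k + 1) := by
      rw [List.drop_eq_getElem_cons hklt, hx]
    have hgetk : ts.getD k ("", "") = (w0, t0) := by
      rw [List.getD_eq_getElem ts ("", "") hklt, hx]
    have hprev1 : (decide (1 ≤ k + 1) && ((ts.getD (k + 1 - 1) ("", "")).2 == tag)) = (t0 == tag) := by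
      simp [hget2]
    rw [List.range'_succ, List.foldl_cons, hdrop]
    by_cases htag : t0 = tag
    · have hb : (t0 == tag) = true := by simp [htag]
      simp only [hgetk, hb, if_true]
      rw [ih (k + 1) out (acc ++ " " ++ w0) (by omega), hprev1, hb]
      simp [mid, hb]
    · have hb : (t0 == tag) = false := by simp [htag]
      by_cases hprev : (decide (1 ≤ k) && ((ts.getD (k - 1) ("", "")).2 == tag)) = true
      · simp only [hgetk, hb, hprev, Bool.false_eq_true, if_false, if_true]
        rw [ih (k + 1) (out ++ [acc]) "" (by omega), hprev1, hb]
        simp [mid, hb]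
      · have hprevf : (decide (1 ≤ k) && ((ts.getD (k - 1) ("", "")).2 == tag)) = false := by
          simpa using hprev
        simp only [hgetk, hb, hprevf, Bool.false_eq_true, if_false]
        rw [ih (k + 1) out acc (by omega), hprev1, hb]
        simp [mid, hb]

lemma stanPass_eq_mid (tag : String) (ts : List (String × String)) :
    stanPass tag ts = mid tag false "" ts := by
  unfold stanPass
  rw [List.range_eq_range']
  rw [stanPass_range' tag ts ts.length 0 [] "" (by omega)]
  simp

-- skipping a block of tokens that all carry tag t ≠ tag leaves mid unchanged
lemma mid_skip (tag t : String) (hne : (t == tag) = false) :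
    ∀ (same rest : List (String × String)), (∀ p ∈ same, p.2 = t) →
      mid tag false "" (same ++ rest) = mid tag false "" rest := by
  intro same
  induction same with
  | nil => intro rest _; simp
  | cons p ps ih =>
    intro rest hall
    obtain ⟨w', t'⟩ := p
    have ht' : t' = t := hall (w', t') (List.mem_cons_self)
    simp only [List.cons_append, mid, ht', hne, Bool.false_eq_true, if_false]
    exact ih rest (fun q hq => hall q (List.mem_cons_of_mem _ hq))

-- consuming a run of tokens that all carry the wanted tag accumulates their words
lemma mid_run (tag : String) :
    ∀ (same rest : List (String × String)) (acc : String), (∀ p ∈ same, p.2 = tag) →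
      mid tag true acc (same ++ rest)
        = mid tag true (acc ++ joinPhrase (same.map (·.1))) rest := by
  intro same
  induction same with
  | nil =>
    intro rest acc _
    simp [joinPhrase, String.join]
  | cons p ps ih =>
    intro rest acc hall
    obtain ⟨w', t'⟩ := p
    have ht' : t' = tag := hall (w', t') (List.mem_cons_self)
    simp only [List.cons_append, mid, ht', beq_self_eq_true, if_pos]
    rw [ih rest (acc ++ " " ++ w') (fun q hq => hall q (List.mem_cons_of_mem _ hq))]
    congr 1
    simp [List.map_cons, joinPhrase_cons, String.append_assoc]

-- one unfolding step of B: the head run is kept iff it is non-trailing and has the tag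
lemma phrasesB_cons (tag w t : String) (rest : List (String × String)) :
    phrasesB tag ((w, t) :: rest) =
      (if t == tag && !(rest.dropWhile (fun p => p.2 == t)).isEmpty then
         [joinPhrase (w :: (rest.takeWhile (fun p => p.2 == t)).map (·.1))] else [])
      ++ phrasesB tag (rest.dropWhile (fun p => p.2 == t)) := by
  simp only [phrasesB, runsB, List.filterMap_cons]
  by_cases h : (t == tag && !(rest.dropWhile (fun p => p.2 == t)).isEmpty) = true
  · simp [h]
  · simp [eq_false_of_ne_true h]

lemma phrasesB_eq_mid (tag : String) (ts : List (String × String)) :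
    phrasesB tag ts = mid tag false "" ts := by
  generalize hn : ts.length = n
  induction n using Nat.strong_induction_on generalizing ts with
  | _ n ih =>
    match ts, hn with
    | [], _ => simp [phrasesB, runsB, mid]
    | (w, t) :: rest, hn =>
      have hsame : ∀ p ∈ rest.takeWhile (fun p => p.2 == t), p.2 = t := by
        intro p hp
        have := List.mem_takeWhile_imp hp
        simpa using this
      have hsplit : rest = rest.takeWhile (fun p => p.2 == t) ++ rest.dropWhile (fun p => p.2 == t) :=
        (List.takeWhile_append_dropWhile).symm
      have hremlen : (rest.dropWhile (fun p => p.2 == t)).length < n := by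
        have := List.length_dropWhile_le (p := fun p => p.2 == t) (l := rest)
        simp only [← hn, List.length_cons]; omega
      have ihrem := ih _ hremlen (rest.dropWhile (fun p => p.2 == t)) rfl
      by_cases htag : t = tag
      · subst htag
        have hmid1 : mid t false "" ((w, t) :: rest) = mid t true (" " ++ w) rest := by
          simp [mid]
        rw [phrasesB_cons, hmid1]
        conv_rhs => rw [hsplit]
        rw [mid_run t _ _ _ hsame,
          show (" " ++ w) ++ joinPhrase ((rest.takeWhile (fun p => p.2 == t)).map (·.1))
              = joinPhrase (w :: (rest.takeWhile (fun p => p.2 == t)).map (·.1)) from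
            (joinPhrase_cons w _).symm]
        match hrem : rest.dropWhile (fun p => p.2 == t) with
        | [] =>
          rw [hrem]
          simp [phrasesB, runsB, mid]
        | (w', t') :: rest' =>
          have hne : (rest.dropWhile (fun p => p.2 == t)) ≠ [] := by rw [hrem]; simp
          have hh := List.head_dropWhile_not (fun (p : String × String) => p.2 == t) hne
          have h0 : (w', t') = (rest.dropWhile (fun p => p.2 == t)).head hne := by
            have h1 : (rest.dropWhile (fun p => p.2 == t)).head? = some (w', t') := by
              rw [hrem]; rfl
            have h2 := List.head?_eq_some_head (l := rest.dropWhile (fun p => p.2 == t)) hne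
            rw [h1] at h2
            exact Option.some.inj h2
          have ht' : (t' == t) = false := by
            rw [← h0] at hh
            simpa using hh
          rw [hrem] at ihrem ⊢
          simp only [List.isEmpty_cons, Bool.not_false, beq_self_eq_true, Bool.true_and,
            if_true, List.singleton_append]
          rw [ihrem]
          simp [mid, ht']
      · have htagb : (t == tag) = false := beq_eq_false_iff_ne.mpr htag
        rw [phrasesB_cons]
        simp only [htagb, Bool.false_and, Bool.false_eq_true, if_false, List.nil_append]
        rw [ihrem]
        have hmid1 : mid tag false "" ((w, t) :: rest) = mid tag false "" rest := by
          simp [mid, htagb]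
        rw [hmid1]
        conv_rhs => rw [hsplit]
        exact (mid_skip tag t htagb _ _ hsame).symm

-- ===== VERDICT (by name: the statement is the Claim_ definition above) =====
theorem stan_sub_list_spec : Claim_equal_stan_sub_list := by
  intro nlist _
  unfold Spec_stan_sub_list stan_sub_list stan_sub_list_alt
  simp only [PySem.List.foldl_append_singleton_eq_map, List.nil_append, Prod.mk.injEq]
  refine ⟨?_, ?_, ?_⟩ <;>
    exact List.map_congr_left (fun ts _ => by rw [stanPass_eq_mid, phrasesB_eq_mid])
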